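-- pv_equiv track=rewrite | github.com/steffenmaus/EverybodyCodes_2025 | quest16/part2.py | check
-- ===== SOURCE A (Python) =====
-- def check(spell, columns):
--     matches = 0
--     for i, count in enumerate(columns, 1):
--         current = 0
--         for n in spell:
--             if i % n == 0:
--                 current += 1
--         if current > count:
--             return False, 0
--         if current == count:
--             matches += 1
--     return True, matches
-- ===== SOURCE B (Python) =====
-- def check(spell, columns):
--     C = len(columns)
--     cnt = [0] * (C + 1)
--     for n in spell:
--         d = abs(n)
--         for k in range(1, C // d + 1):
--             cnt[k * d] += 1
--     matches = 0
--     for i, count in enumerate(columns, 1):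
--         current = cnt[i]
--         if current > count:
--             return False, 0
--         if current == count:
--             matches += 1
--     return True, matches
-- ===== Notes on version B (the rewrite author's own statement) =====
-- stated objective: faster
-- what changed: Replaces the per-column scan of spell (O(C*S)) by a sieve: each spell value |n| marks its multiples in a count array once, then one pass compares counts to targets.
-- outside the precondition, e.g. on check([0], []): A returns (True, 0), B raises ZeroDivisionError
import Mathlib
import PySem

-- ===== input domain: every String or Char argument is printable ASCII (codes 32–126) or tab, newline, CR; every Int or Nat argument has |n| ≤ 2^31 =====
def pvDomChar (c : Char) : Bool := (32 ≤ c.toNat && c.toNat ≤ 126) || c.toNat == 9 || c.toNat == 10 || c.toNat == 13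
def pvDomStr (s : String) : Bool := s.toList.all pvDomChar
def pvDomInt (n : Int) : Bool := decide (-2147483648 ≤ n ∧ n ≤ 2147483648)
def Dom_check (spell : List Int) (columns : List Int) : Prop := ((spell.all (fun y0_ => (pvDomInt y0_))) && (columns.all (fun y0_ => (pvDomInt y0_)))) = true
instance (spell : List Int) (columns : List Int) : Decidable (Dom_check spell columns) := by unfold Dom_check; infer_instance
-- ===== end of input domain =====

-- B replaces A's per-column scan of spell by a sieve over a count array (objective: faster).

-- ===== PORT A =====
-- inner loop: current = 0; for n in spell: if i % n == 0: current += 1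
def checkInner (spell : List Int) (i : Int) : Int :=
  spell.foldl (fun current n => if PySem.Int.mod i n == 0 then current + 1 else current) 0

-- outer loop with early return (False, 0)
def checkGo (spell : List Int) : List Int → Int → Int → Bool × Int
  | [], _, ms => (true, ms)
  | count :: rest, i, ms =>
    let current := checkInner spell i
    if current > count then (false, 0)
    else checkGo spell rest (i + 1) (if current == count then ms + 1 else ms)

def check (spell : List Int) (columns : List Int) : Bool × Int :=
  checkGo spell columns 1 0

-- ===== PORT B =====
-- cnt[j] += 1 (indices here are nonnegative Python ints, so a Nat index is exact)
def bump : List Int → Nat → List Int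
  | [], _ => []
  | x :: xs, 0 => (x + 1) :: xs
  | x :: xs, j + 1 => x :: bump xs j

-- for k in range(1, C // d + 1): cnt[k*d] += 1   (List.range' 1 q = [1,…,q] is range(1, q+1))
def sieveSpell (C : Nat) (cnt : List Int) (n : Int) : List Int :=
  let d := n.natAbs
  (List.range' 1 (C / d)).foldl (fun l k => bump l (k * d)) cnt

def checkAltGo (cnt : List Int) : List Int → Nat → Int → Bool × Int
  | [], _, ms => (true, ms)
  | count :: rest, i, ms =>
    let current := cnt.getD i 0
    if current > count then (false, 0)
    else checkAltGo cnt rest (i + 1) (if current == count then ms + 1 else ms)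

def check_alt (spell : List Int) (columns : List Int) : Bool × Int :=
  let C := columns.length
  let cnt := spell.foldl (sieveSpell C) (List.replicate (C + 1) 0)
  checkAltGo cnt columns 1 0

-- ===== PRECONDITION & SPEC =====
-- Pre_ excludes spells containing 0: A raises ZeroDivisionError at i % n on every non-empty columns, and B raises it at C // d even for empty columns (where A returns (True, 0) only because its loop body never runs).
def Pre_check (spell : List Int) (columns : List Int) : Prop := ∀ n ∈ spell, n ≠ 0
instance (spell : List Int) (columns : List Int) : Decidable (Pre_check spell columns) := by unfold Pre_check; infer_instance
def pvWitness_check : List Int × List Int := ([2, 3, -4], [1, 1, 2, 0, 1])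

def Spec_check (spell : List Int) (columns : List Int) (out : Bool × Int) : Prop := out = check_alt spell columns
instance (spell : List Int) (columns : List Int) (out : Bool × Int) : Decidable (Spec_check spell columns out) := by unfold Spec_check; infer_instance

-- ===== CLAIM (what is proved, stated in full; the proofs are below) =====
def Claim_equal_check : Prop := ∀ (spell : List Int) (columns : List Int), Dom_check spell columns → Pre_check spell columns → Spec_check spell columns (check spell columns)

-- ===== LEMMAS AND PROOFS =====

theorem length_bump (l : List Int) (j : Nat) : (bump l j).length = l.length := by
  induction l generalizing j with
  | nil => rfl
  | cons x xs ih => cases j with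
    | zero => rfl
    | succ j => simp [bump, ih]

theorem getD_bump (l : List Int) (j i : Nat) :
    (bump l j).getD i 0 = if i = j ∧ j < l.length then l.getD i 0 + 1 else l.getD i 0 := by
  induction l generalizing j i with
  | nil => simp [bump]
  | cons x xs ih =>
    cases j with
    | zero =>
      cases i with
      | zero => simp [bump]
      | succ i => simp [bump]
    | succ j =>
      cases i with
      | zero => simp [bump]
      | succ i =>
        have h := ih j i
        simp only [List.getD] at h
        simpa [bump, List.getD] using h

theorem length_sieve_fold (d : Nat) (ks : List Nat) (l : List Int) :
    (ks.foldl (fun l k => bump l (k * d)) l).length = l.length := by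
  induction ks generalizing l with
  | nil => rfl
  | cons k ks ih => simp [List.foldl_cons, ih, length_bump]

theorem getD_sieve_fold (d : Nat) (hd : 0 < d) (q : Nat) (l : List Int) (i : Nat)
    (hq : q * d < l.length) :
    ((List.range' 1 q).foldl (fun l k => bump l (k * d)) l).getD i 0
      = l.getD i 0 + (if d ∣ i ∧ 1 ≤ i ∧ i ≤ q * d then 1 else 0) := by
  induction q with
  | zero =>
    simp only [List.range'_zero, List.foldl_nil, Nat.zero_mul]
    rw [if_neg (by rintro ⟨_, h1, h2⟩; omega)]
    ring
  | succ q ih =>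
    have heq : (1 + q) * d = (q + 1) * d := by ring
    have hqd : q * d < l.length := by nlinarith
    rw [List.range'_1_concat, List.foldl_append, List.foldl_cons, List.foldl_nil,
      getD_bump, length_sieve_fold, ih hqd]
    have hnot : ¬ ((1 + q) * d ≤ q * d) := by
      have := (Nat.mul_lt_mul_right hd).mpr (show q < 1 + q by omega)
      omega
    by_cases hi : i = (1 + q) * d
    · have hbump : i = (1 + q) * d ∧ (1 + q) * d < l.length := ⟨hi, by omega⟩
      have hcond : d ∣ i ∧ 1 ≤ i ∧ i ≤ (q + 1) * d := by
        subst hi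
        exact ⟨⟨1 + q, by ring⟩, Nat.mul_pos (by omega) hd, Nat.le_of_eq heq⟩
      rw [if_pos hbump, if_neg (by rintro ⟨_, _, h⟩; exact hnot (hi ▸ h)), if_pos hcond]
      ring
    · rw [if_neg (fun h => hi h.1)]
      congr 1
      by_cases hc : d ∣ i ∧ 1 ≤ i ∧ i ≤ q * d
      · exact (if_pos hc).trans
          (if_pos ⟨hc.1, hc.2.1, le_trans hc.2.2 (Nat.mul_le_mul_right d (by omega))⟩).symm
      · rw [if_neg hc, if_neg]
        rintro ⟨hdvd, h1, h2⟩
        apply hc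
        refine ⟨hdvd, h1, ?_⟩
        obtain ⟨m, rfl⟩ := hdvd
        have hm : m ≤ q := by
          rcases Nat.lt_or_ge q m with hgt | hle
          · exfalso
            have hge : (q + 1) * d ≤ d * m :=
              calc (q + 1) * d = d * (q + 1) := by ring
                _ ≤ d * m := Nat.mul_le_mul_left d hgt
            have heq2 : d * m = (q + 1) * d := le_antisymm h2 hge
            exact hi (heq2.trans heq.symm)
          · exact hle
        calc d * m ≤ d * q := Nat.mul_le_mul_left d hm
          _ = q * d := Nat.mul_comm d q

theorem length_cnt (C : Nat) (spell : List Int) (l : List Int) :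
    (spell.foldl (sieveSpell C) l).length = l.length := by
  induction spell generalizing l with
  | nil => rfl
  | cons n spell ih => simp [List.foldl_cons, ih, sieveSpell, length_sieve_fold]

theorem cnt_getD (C : Nat) (spell : List Int) (hs : ∀ n ∈ spell, n ≠ 0) (i : Nat)
    (h1 : 1 ≤ i) (hC : i ≤ C) :
    (spell.foldl (sieveSpell C) (List.replicate (C + 1) 0)).getD i 0 = checkInner spell (i : Int) := by
  induction spell using List.reverseRecOn with
  | nil =>
    have h : i < C + 1 := by omega
    simp [checkInner, List.getD, h]
  | append_singleton xs n ih =>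
    have hn : n ≠ 0 := hs n (by simp)
    have hd : 0 < n.natAbs := Int.natAbs_pos.mpr hn
    rw [List.foldl_append, List.foldl_cons, List.foldl_nil]
    show (sieveSpell C (xs.foldl (sieveSpell C) _) n).getD i 0 = _
    rw [sieveSpell]
    rw [getD_sieve_fold n.natAbs hd (C / n.natAbs) _ i
      (by rw [length_cnt, List.length_replicate]; have := Nat.div_mul_le_self C n.natAbs; omega)]
    rw [ih (fun m hm => hs m (by simp [hm]))]
    have hsplit : checkInner (xs ++ [n]) (i : Int)
        = if (PySem.Int.mod (i : Int) n == 0) = true then checkInner xs (i : Int) + 1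
          else checkInner xs (i : Int) := by
      simp only [checkInner, List.foldl_append, List.foldl_cons, List.foldl_nil]
    rw [hsplit]
    have hdvd : ((PySem.Int.mod (i : Int) n == 0) = true) ↔ n.natAbs ∣ i := by
      rw [beq_iff_eq, PySem.Int.mod_eq_zero_iff_dvd]
      constructor
      · intro h
        have := Int.natAbs_dvd_natAbs.mpr h
        simpa using this
      · intro h
        exact Int.natAbs_dvd.mp (Int.natCast_dvd_natCast.mpr h)
    by_cases hc : n.natAbs ∣ i
    · have hle : i ≤ C / n.natAbs * n.natAbs := by
        obtain ⟨m, rfl⟩ := hc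
        have hm : m ≤ C / n.natAbs := (Nat.le_div_iff_mul_le hd).mpr (by rw [Nat.mul_comm]; exact hC)
        calc n.natAbs * m ≤ n.natAbs * (C / n.natAbs) := Nat.mul_le_mul_left _ hm
          _ = C / n.natAbs * n.natAbs := Nat.mul_comm _ _
      rw [if_pos ⟨hc, h1, hle⟩, if_pos (hdvd.mpr hc)]
    · rw [if_neg (fun h => hc h.1), if_neg (fun h => hc (hdvd.mp h))]
      ring

theorem go_eq (spell cnt : List Int) (C : Nat)
    (hcnt : ∀ j : Nat, 1 ≤ j → j ≤ C → cnt.getD j 0 = checkInner spell (j : Int)) :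
    ∀ (cols : List Int) (i : Nat) (m : Int), 1 ≤ i → i + cols.length ≤ C + 1 →
      checkGo spell cols (i : Int) m = checkAltGo cnt cols i m := by
  intro cols
  induction cols with
  | nil => intro i m _ _; rfl
  | cons count rest ih =>
    intro i m h1 h2
    simp only [checkGo, checkAltGo]
    rw [hcnt i h1 (by simp only [List.length_cons] at h2; omega)]
    by_cases hgt : checkInner spell (i : Int) > count
    · rw [if_pos hgt, if_pos hgt]
    · rw [if_neg hgt, if_neg hgt]
      have hcast : ((i : Int) + 1) = ((i + 1 : Nat) : Int) := by push_cast; ring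
      rw [hcast]
      exact ih (i + 1) _ (by omega) (by simp only [List.length_cons] at h2 ⊢; omega)

-- ===== VERDICT (by name: the statement is the Claim_ definition above) =====
theorem check_spec : Claim_equal_check := by
  intro spell columns _hdom hpre
  unfold Spec_check check check_alt
  show checkGo spell columns 1 0
    = checkAltGo (spell.foldl (sieveSpell columns.length) (List.replicate (columns.length + 1) 0)) columns 1 0
  have h1 : (1 : Int) = ((1 : Nat) : Int) := by norm_num
  rw [h1]
  exact go_eq spell _ columns.length
    (fun j hj1 hj2 => cnt_getD columns.length spell hpre j hj1 hj2)
    columns 1 0 (by omega) (by omega)
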